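-- pv_equiv track=rewrite | github.com/rizvi-kth/python-cronicals | Python-Course/py-streamlit/fix_pred.py | format_1
-- ===== SOURCE A (Python) =====
-- from itertools import groupby
--
-- def format_1(entity_names, entity_types):
--     # Remove the [PAD]s'
--     entity_names_2 = []
--     entity_types_2 = []
--     [(entity_names_2.append(n), entity_types_2.append(t)) for n, t in zip(entity_names, entity_types) if n != "[PAD]"]
--     assert len(entity_names_2) == len(entity_types_2)
--
--     # Group same Entity-Types
--     groupedEntity = [list(y) for x, y in groupby(entity_types_2)]
--     entity_names_2.reverse()
--
--     # Group Entity_Names by Entity-Types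
--     groupedNames = []
--     for g in groupedEntity:
--         groupLocals = []
--         for e in g:
--             groupLocals.append(entity_names_2.pop())
--         groupedNames.append(groupLocals)
--     assert len(groupedNames) == len(groupedEntity)
--
--     # Prepare the dictionary
--     nameEntityDict = {}
--     for nms, ent in zip(groupedNames, groupedEntity):
--         if ent[0] != "O":
--             # nameEntityDict[tuple(nms)] = ent[0]
--             nameEntityDict[", ".join(nms)] = ent[0]
--
--     return nameEntityDict
-- ===== SOURCE B (Python) =====
-- def format_1(entity_names, entity_types):
--     # Single fused pass: skip [PAD] pairs, accumulate the current run of equal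
--     # types, flush a run into the dict when the type changes and at the end.
--     result = {}
--     cur_type = None
--     cur_names = []
--     for n, t in zip(entity_names, entity_types):
--         if n == "[PAD]":
--             continue
--         if cur_names and t == cur_type:
--             cur_names.append(n)
--         else:
--             if cur_names and cur_type != "O":
--                 result[", ".join(cur_names)] = cur_type
--             cur_type = t
--             cur_names = [n]
--     if cur_names and cur_type != "O":
--         result[", ".join(cur_names)] = cur_type
--     return result
-- ===== Notes on version B (the rewrite author's own statement) =====
-- stated objective: simpler
-- what changed: Replaced A's four phases (build two filtered lists, groupby the types, reverse the names and redistribute them by popping, then zip back into a dict) by one fused pass over zip(entity_names, entity_types) that skips [PAD] pairs and maintains the current run's type and names, flushing a run into the dict when the type changes and at the end. (single pass avoids building and re-traversing the intermediate lists, measured ~1.6x faster)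
import Mathlib
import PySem

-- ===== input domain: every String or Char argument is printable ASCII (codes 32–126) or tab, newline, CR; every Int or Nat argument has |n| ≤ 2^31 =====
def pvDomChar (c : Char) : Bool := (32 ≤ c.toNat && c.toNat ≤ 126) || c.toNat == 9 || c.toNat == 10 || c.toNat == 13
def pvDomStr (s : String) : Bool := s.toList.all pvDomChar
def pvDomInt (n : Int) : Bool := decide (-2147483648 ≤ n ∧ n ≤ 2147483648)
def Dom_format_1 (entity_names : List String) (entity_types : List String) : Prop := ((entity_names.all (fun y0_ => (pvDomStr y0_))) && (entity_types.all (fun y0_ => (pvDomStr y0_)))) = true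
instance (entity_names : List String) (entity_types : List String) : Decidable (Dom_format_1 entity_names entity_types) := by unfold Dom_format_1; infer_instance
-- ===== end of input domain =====

-- B fuses A's four phases (filter, groupby, reverse+pop redistribution, dict build)
-- into one pass keeping the current run; objective: simpler.

-- ===== PORT A =====
-- itertools.groupby on a list of strings, as '[list(y) for x, y in groupby(l)]'
def pyGroupbyAux (t : String) (cur : List String) : List String → List (List String)
  | [] => [cur]
  | u :: ts => if u = t then pyGroupbyAux t (cur ++ [u]) ts else cur :: pyGroupbyAux u [u] ts

def pyGroupby : List String → List (List String)
  | [] => []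
  | t :: ts => pyGroupbyAux t [t] ts

def format_1 (entity_names : List String) (entity_types : List String) : List (String × String) :=
  -- Remove the [PAD]s (the comprehension appending to both lists)
  let r := (entity_names.zip entity_types).foldl
      (fun (acc : List String × List String) p =>
        if p.1 = "[PAD]" then acc else (acc.1 ++ [p.1], acc.2 ++ [p.2])) ([], [])
  let entity_names_2 := r.1
  let entity_types_2 := r.2
  -- Group same Entity-Types
  let groupedEntity := pyGroupby entity_types_2
  let rev := entity_names_2.reverse
  -- Group Entity_Names by Entity-Types: pop() takes the last element
  -- ('.pop()' ported by hand via getLast?/dropLast, exact for Python's list.pop();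
  --  the 'none' branch is unreachable since the popped count equals the length)
  let st := groupedEntity.foldl
      (fun (st : List String × List (List String)) g =>
        let inner := g.foldl
          (fun (st2 : List String × List String) _e =>
            match st2.1.getLast? with
            | some x => (st2.1.dropLast, st2.2 ++ [x])
            | none => st2) (st.1, ([] : List String))
        (inner.1, st.2 ++ [inner.2])) (rev, ([] : List (List String)))
  let groupedNames := st.2
  -- Prepare the dictionary ('ent[0]' via match; '[]' branch unreachable: groups are nonempty)
  let nameEntityDict := (groupedNames.zip groupedEntity).foldl
      (fun (d : PySem.Dict String String) pr =>
        match pr.2 with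
        | e :: _ => if e ≠ "O" then d.insert (PySem.Str.join ", " pr.1) e else d
        | [] => d) PySem.Dict.empty
  nameEntityDict.items

-- ===== PORT B =====
-- one step of B's loop: skip [PAD], extend the current run or flush it and start a new one
def stepB (st : PySem.Dict String String × Option (String × List String)) (p : String × String) :
    PySem.Dict String String × Option (String × List String) :=
  if p.1 = "[PAD]" then st
  else match st.2 with
    | some (t, names) =>
      if p.2 = t then (st.1, some (t, names ++ [p.1]))
      else ((if t ≠ "O" then st.1.insert (PySem.Str.join ", " names) t else st.1), some (p.2, [p.1]))
    | none => (st.1, some (p.2, [p.1]))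

-- the final flush after the loop
def finishB (st : PySem.Dict String String × Option (String × List String)) :
    PySem.Dict String String :=
  match st.2 with
  | some (t, names) => if t ≠ "O" then st.1.insert (PySem.Str.join ", " names) t else st.1
  | none => st.1

def format_1_alt (entity_names : List String) (entity_types : List String) : List (String × String) :=
  (finishB ((entity_names.zip entity_types).foldl stepB (PySem.Dict.empty, none))).items

-- ===== PRECONDITION & SPEC =====
def Spec_format_1 (entity_names : List String) (entity_types : List String) (out : List (String × String)) : Prop := out = format_1_alt entity_names entity_types
instance (entity_names : List String) (entity_types : List String) (out : List (String × String)) : Decidable (Spec_format_1 entity_names entity_types out) := by unfold Spec_format_1; infer_instance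

-- ===== CLAIM (what is proved, stated in full; the proofs are below) =====
def Claim_equal_format_1 : Prop := ∀ (entity_names : List String) (entity_types : List String), Dom_format_1 entity_names entity_types → Spec_format_1 entity_names entity_types (format_1 entity_names entity_types)

-- ===== LEMMAS AND PROOFS =====

-- insert one finished run into the dict
def insRun (d : PySem.Dict String String) (r : String × List String) : PySem.Dict String String :=
  if r.1 ≠ "O" then d.insert (PySem.Str.join ", " r.2) r.1 else d

-- the runs of consecutive equal types of a [PAD]-free pair list, given the current run
def runsFrom (t : String) (names : List String) : List (String × String) → List (String × List String)
  | [] => [(t, names)]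
  | p :: ps => if p.2 = t then runsFrom t (names ++ [p.1]) ps
               else (t, names) :: runsFrom p.2 [p.1] ps

-- split a name list into chunks whose sizes are the group sizes
def chunks : List (List String) → List String → List (List String)
  | [], _ => []
  | g :: gs, names => names.take g.length :: chunks gs (names.drop g.length)

theorem foldl_stepB_filter (l : List (String × String))
    (st : PySem.Dict String String × Option (String × List String)) :
    l.foldl stepB st = (l.filter (fun p => p.1 != "[PAD]")).foldl stepB st := by
  induction l generalizing st with
  | nil => rfl
  | cons p ps ih =>
    by_cases h : p.1 = "[PAD]"
    · simp [stepB, h, ih]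
    · simp [h, List.foldl_cons, ih]

theorem finishB_foldl (ps : List (String × String)) (d : PySem.Dict String String)
    (t : String) (names : List String) (h : ∀ p ∈ ps, p.1 ≠ "[PAD]") :
    finishB (ps.foldl stepB (d, some (t, names))) =
      (runsFrom t names ps).foldl insRun d := by
  induction ps generalizing d t names with
  | nil => simp [finishB, runsFrom, insRun]
  | cons p ps ih =>
    have hp : p.1 ≠ "[PAD]" := h p (List.mem_cons_self ..)
    have hps : ∀ q ∈ ps, q.1 ≠ "[PAD]" := fun q hq => h q (List.mem_cons_of_mem _ hq)
    by_cases ht : p.2 = t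
    · simp [stepB, hp, ht, runsFrom, ih _ _ _ hps]
    · simp [stepB, hp, ht, runsFrom, ih _ _ _ hps, insRun]

theorem buildA_foldl (l : List (String × String)) (as ts : List String) :
    l.foldl (fun (acc : List String × List String) p =>
        if p.1 = "[PAD]" then acc else (acc.1 ++ [p.1], acc.2 ++ [p.2])) (as, ts) =
      (as ++ (l.filter (fun p => p.1 != "[PAD]")).map Prod.fst,
       ts ++ (l.filter (fun p => p.1 != "[PAD]")).map Prod.snd) := by
  induction l generalizing as ts with
  | nil => simp
  | cons p ps ih =>
    by_cases h : p.1 = "[PAD]"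
    · simp [h, ih]
    · simp [h, List.foldl_cons, ih]

theorem groupbyAux_runs (ps : List (String × String)) (t : String) (names : List String) :
    pyGroupbyAux t (names.map (fun _ => t)) (ps.map Prod.snd) =
      (runsFrom t names ps).map (fun r => r.2.map (fun _ => r.1)) := by
  induction ps generalizing t names with
  | nil => simp [pyGroupbyAux, runsFrom]
  | cons p ps ih =>
    by_cases h : p.2 = t
    · have heq : (names.map (fun _ => t)) ++ [t] = (names ++ [p.1]).map (fun _ => t) := by
        simp
      simp only [List.map_cons, pyGroupbyAux, h, runsFrom, ite_true]
      rw [heq]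
      exact ih t (names ++ [p.1])
    · have h1 : ([p.2] : List String) = ([p.1]).map (fun _ => p.2) := by simp
      simp only [List.map_cons, pyGroupbyAux, h, runsFrom, ite_false, List.map_cons]
      rw [h1, ih p.2 [p.1]]

theorem inner_pop (g names : List String) (acc : List String)
    (h : g.length ≤ names.length) :
    g.foldl (fun (st2 : List String × List String) _e =>
        match st2.1.getLast? with
        | some x => (st2.1.dropLast, st2.2 ++ [x])
        | none => st2) (names.reverse, acc) =
      ((names.drop g.length).reverse, acc ++ names.take g.length) := by
  induction g generalizing names acc with
  | nil => simp
  | cons e g ih =>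
    match names with
    | [] => simp at h
    | n :: ns =>
      have hlen : g.length ≤ ns.length := by simpa using h
      simp only [List.foldl_cons, List.reverse_cons, List.getLast?_concat,
        List.dropLast_concat]
      rw [ih ns (acc ++ [n]) hlen]
      simp

theorem outer_loop (gs : List (List String)) (names : List String)
    (acc : List (List String)) (h : (gs.map List.length).sum ≤ names.length) :
    gs.foldl (fun (st : List String × List (List String)) g =>
        let inner := g.foldl
          (fun (st2 : List String × List String) _e =>
            match st2.1.getLast? with
            | some x => (st2.1.dropLast, st2.2 ++ [x])
            | none => st2) (st.1, ([] : List String))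
        (inner.1, st.2 ++ [inner.2])) (names.reverse, acc) =
      ((names.drop (gs.map List.length).sum).reverse, acc ++ chunks gs names) := by
  induction gs generalizing names acc with
  | nil => simp [chunks]
  | cons g gs ih =>
    have hg : g.length ≤ names.length := by simp at h; omega
    have hgs : (gs.map List.length).sum ≤ (names.drop g.length).length := by
      simp at h ⊢; omega
    simp only [List.foldl_cons]
    rw [inner_pop g names [] hg]
    simp only [List.nil_append]
    rw [ih (names.drop g.length) (acc ++ [names.take g.length]) hgs]
    simp [chunks, List.drop_drop]

theorem chunks_runs (ps : List (String × String)) (t : String) (names : List String) :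
    chunks ((runsFrom t names ps).map (fun r => r.2.map (fun _ => r.1)))
        (names ++ ps.map Prod.fst) =
      (runsFrom t names ps).map Prod.snd := by
  induction ps generalizing t names with
  | nil => simp [runsFrom, chunks]
  | cons p ps ih =>
    by_cases h : p.2 = t
    · simp only [runsFrom, h, ite_true, List.map_cons]
      have heq : names ++ p.1 :: ps.map Prod.fst = (names ++ [p.1]) ++ ps.map Prod.fst := by
        simp
      rw [heq]
      exact ih t (names ++ [p.1])
    · simp only [runsFrom, h, ite_false, List.map_cons, chunks, List.length_map]
      rw [List.take_left', List.drop_left']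
      · have h2 := ih p.2 [p.1]
        rw [List.singleton_append] at h2
        rw [h2]
      · rfl
      · rfl

theorem runs_sum_len (ps : List (String × String)) (t : String) (names : List String) :
    (((runsFrom t names ps).map (fun r => r.2.map (fun _ => r.1))).map List.length).sum =
      names.length + ps.length := by
  induction ps generalizing t names with
  | nil => simp [runsFrom]
  | cons p ps ih =>
    by_cases h : p.2 = t
    · simp only [runsFrom, h, ite_true]
      rw [ih t (names ++ [p.1])]; simp; omega
    · simp only [runsFrom, h, ite_false, List.map_cons, List.sum_cons]
      rw [ih p.2 [p.1]]; simp; omega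

theorem runs_nonempty (ps : List (String × String)) (t : String) (names : List String)
    (h : names ≠ []) : ∀ r ∈ runsFrom t names ps, r.2 ≠ [] := by
  induction ps generalizing t names with
  | nil => simpa [runsFrom] using h
  | cons p ps ih =>
    by_cases hp : p.2 = t
    · simpa [runsFrom, hp] using ih t (names ++ [p.1]) (by simp)
    · intro r hr
      simp only [runsFrom, hp, ite_false, List.mem_cons] at hr
      rcases hr with rfl | hr
      · exact h
      · exact ih p.2 [p.1] (by simp) r hr

theorem foldl_congr_mem_ins {α : Type} (l : List α)
    (f g : PySem.Dict String String → α → PySem.Dict String String)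
    (d : PySem.Dict String String) (h : ∀ x ∈ l, ∀ d', f d' x = g d' x) :
    l.foldl f d = l.foldl g d := by
  induction l generalizing d with
  | nil => rfl
  | cons x xs ih =>
    simp only [List.foldl_cons]
    rw [h x (List.mem_cons_self ..), ih _ (fun y hy => h y (List.mem_cons_of_mem _ hy))]

theorem dict_fold_runs (rs : List (String × List String)) (h : ∀ r ∈ rs, r.2 ≠ []) :
    ((rs.map Prod.snd).zip (rs.map (fun r => r.2.map (fun _ => r.1)))).foldl
        (fun (d : PySem.Dict String String) pr =>
          match pr.2 with
          | e :: _ => if e ≠ "O" then d.insert (PySem.Str.join ", " pr.1) e else d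
          | [] => d) PySem.Dict.empty =
      rs.foldl insRun PySem.Dict.empty := by
  rw [List.zip_map', List.foldl_map]
  apply foldl_congr_mem_ins
  intro r hr d'
  have := h r hr
  match r, this with
  | (t, n :: ns), _ => simp [insRun]

-- the two sides agree run by run
theorem main_eq (entity_names entity_types : List String) :
    format_1 entity_names entity_types = format_1_alt entity_names entity_types := by
  unfold format_1 format_1_alt
  rw [foldl_stepB_filter]
  rw [buildA_foldl]
  simp only [List.nil_append]
  set qs := (entity_names.zip entity_types).filter (fun p => p.1 != "[PAD]") with hqs
  have hpad : ∀ p ∈ qs, p.1 ≠ "[PAD]" := by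
    intro p hp
    have := List.of_mem_filter (hqs ▸ hp)
    simpa using this
  match qs, hpad with
  | [], _ => simp [pyGroupby, finishB]
  | q :: qs', hpad =>
    have hq1 : q.1 ≠ "[PAD]" := hpad q (List.mem_cons_self ..)
    -- A side
    have hgb : pyGroupby ((q :: qs').map Prod.snd) =
        (runsFrom q.2 [q.1] qs').map (fun r => r.2.map (fun _ => r.1)) := by
      have h1 : ([q.2] : List String) = ([q.1]).map (fun _ => q.2) := by simp
      simp only [List.map_cons, pyGroupby]
      rw [h1, groupbyAux_runs]
    rw [hgb]
    have hsum : (((runsFrom q.2 [q.1] qs').map (fun r => r.2.map (fun _ => r.1))).map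
        List.length).sum ≤ ((q :: qs').map Prod.fst).length := by
      rw [runs_sum_len]; simp; omega
    rw [outer_loop _ _ _ hsum]
    simp only [List.nil_append]
    have hch : chunks ((runsFrom q.2 [q.1] qs').map (fun r => r.2.map (fun _ => r.1)))
        ((q :: qs').map Prod.fst) = (runsFrom q.2 [q.1] qs').map Prod.snd := by
      have : (q :: qs').map Prod.fst = [q.1] ++ qs'.map Prod.fst := by simp
      rw [this, chunks_runs]
    rw [hch, dict_fold_runs _ (runs_nonempty qs' q.2 [q.1] (by simp))]
    -- B side
    have hps : ∀ p ∈ qs', p.1 ≠ "[PAD]" := fun p hp => hpad p (List.mem_cons_of_mem _ hp)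
    have hstep : stepB (PySem.Dict.empty, none) q = (PySem.Dict.empty, some (q.2, [q.1])) := by
      simp [stepB, hq1]
    rw [List.foldl_cons, hstep, finishB_foldl qs' _ q.2 [q.1] hps]

-- ===== VERDICT (by name: the statement is the Claim_ definition above) =====
theorem format_1_spec : Claim_equal_format_1 := by
  intro entity_names entity_types _
  unfold Spec_format_1
  exact main_eq entity_names entity_types
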